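-- pv_equiv track=rewrite | github.com/arushi-data/projects- | python_a1/28130006_Task1.py | days_before_month
-- ===== SOURCE A (Python) =====
-- def is_leap(year):
--     """check year is leap year"""
--     return year % 4 == 0 and (year % 100 != 0 or year % 400 == 0)
--
-- def days_before_month(year, month):
--     """check year, month -> number of days in year preceding first day of month."""
--     _DAYS_IN_MONTH = [-1, 31, 28, 31, 30, 31, 30, 31, 31, 30, 31, 30, 31]
--     _DAYS_BEFORE_MONTH = [-1]  # -1 is a placeholder for indexing purposes.
--     dbm = 0
--     for dim in _DAYS_IN_MONTH[1:]:
--         _DAYS_BEFORE_MONTH.append(dbm)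
--         dbm += dim
--     del dbm, dim
--     assert 1 <= month <= 12, 'month must be in 1..12'
--     return _DAYS_BEFORE_MONTH[month] + (month > 2 and is_leap(year))
-- ===== SOURCE B (Python) =====
-- def is_leap(year):
--     """check year is leap year"""
--     return year % 4 == 0 and (year % 100 != 0 or year % 400 == 0)
--
-- _DAYS_IN_MONTH = [-1, 31, 28, 31, 30, 31, 30, 31, 31, 30, 31, 30, 31]
--
-- def days_before_month(year, month):
--     """check year, month -> number of days in year preceding first day of month."""
--     assert 1 <= month <= 12, 'month must be in 1..12'
--     return sum(_DAYS_IN_MONTH[1:month]) + (month > 2 and is_leap(year))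
-- ===== Notes on version B (the rewrite author's own statement) =====
-- stated objective: simpler
-- what changed: B drops the cumulative-table construction and indexing, summing only the needed prefix of the month-length list directly.
import Mathlib
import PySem

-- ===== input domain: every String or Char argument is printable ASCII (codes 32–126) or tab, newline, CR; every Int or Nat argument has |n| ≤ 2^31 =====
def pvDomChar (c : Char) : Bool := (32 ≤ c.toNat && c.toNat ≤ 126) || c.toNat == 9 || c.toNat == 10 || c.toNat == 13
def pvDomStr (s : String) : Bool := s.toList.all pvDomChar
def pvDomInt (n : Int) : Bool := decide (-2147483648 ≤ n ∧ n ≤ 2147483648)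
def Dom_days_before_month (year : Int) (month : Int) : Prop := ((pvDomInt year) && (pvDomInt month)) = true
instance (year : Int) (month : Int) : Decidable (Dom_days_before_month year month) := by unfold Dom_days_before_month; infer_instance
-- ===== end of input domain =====

-- ===== PORT A =====
-- is_leap: year % 4 == 0 and (year % 100 != 0 or year % 400 == 0)
def is_leap (year : Int) : Bool :=
  PySem.Int.mod year 4 == 0 && (PySem.Int.mod year 100 != 0 || PySem.Int.mod year 400 == 0)

-- Literal port of A: builds the cumulative _DAYS_BEFORE_MONTH table by a loop,
-- then indexes it (Pre_ excludes the assert failure; indexing is then in range).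
def days_before_month (year : Int) (month : Int) : Int :=
  let dim_list : List Int := [-1, 31, 28, 31, 30, 31, 30, 31, 31, 30, 31, 30, 31]
  let st := (PySem.List.slice dim_list (some 1) none).foldl
      (fun (p : List Int × Int) dim => (p.1 ++ [p.2], p.2 + dim)) ([-1], 0)
  PySem.List.pyGetD st.1 month 0 + (if month > 2 && is_leap year then 1 else 0)

-- ===== PORT B =====
def daysInMonthB : List Int := [-1, 31, 28, 31, 30, 31, 30, 31, 31, 30, 31, 30, 31]

-- Port of B: sum of the slice _DAYS_IN_MONTH[1:month] plus the leap correction.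
def days_before_month_alt (year : Int) (month : Int) : Int :=
  (PySem.List.slice daysInMonthB (some 1) (some month)).sum
    + (if month > 2 && is_leap year then 1 else 0)

-- ===== PRECONDITION & SPEC =====
-- A's assert raises AssertionError unless 1 <= month <= 12; exactly those inputs are excluded.
def Pre_days_before_month (year : Int) (month : Int) : Prop := 1 ≤ month ∧ month ≤ 12
instance (year : Int) (month : Int) : Decidable (Pre_days_before_month year month) := by unfold Pre_days_before_month; infer_instance
def pvWitness_days_before_month : Int × Int := (2024, 3)

def Spec_days_before_month (year : Int) (month : Int) (out : Int) : Prop := out = days_before_month_alt year month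
instance (year : Int) (month : Int) (out : Int) : Decidable (Spec_days_before_month year month out) := by unfold Spec_days_before_month; infer_instance

-- ===== CLAIM (what is proved, stated in full; the proofs are below) =====
def Claim_equal_days_before_month : Prop := ∀ (year : Int) (month : Int), Dom_days_before_month year month → Pre_days_before_month year month → Spec_days_before_month year month (days_before_month year month)

-- ===== LEMMAS AND PROOFS =====

-- For each admitted month, both sides differ from the leap term by the same constant.
theorem table_eq_prefix_sum (year month : Int) (h1 : 1 ≤ month) (h2 : month ≤ 12) :
    days_before_month year month = days_before_month_alt year month := by
  unfold days_before_month days_before_month_alt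
  interval_cases month <;> (congr 1 <;> decide)

-- ===== VERDICT (by name: the statement is the Claim_ definition above) =====
theorem days_before_month_spec : Claim_equal_days_before_month := by
  intro year month _ hpre
  exact table_eq_prefix_sum year month hpre.1 hpre.2
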